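-- pv_equiv track=rewrite | github.com/hdesai17/Digest_It | app/main.py | aspn_digest
-- ===== SOURCE A (Python) =====
-- def aspn_digest(protein_sequence):
--     peptides = []
--     # Split the sequence after each occurrence of D
--     cutsites = [0] + [i+1 for i, aa in enumerate(protein_sequence) if aa == 'D']
--     for i in range(len(cutsites)-1):
--         peptide = protein_sequence[cutsites[i]:cutsites[i+1]]
--         peptides.append(peptide)
--
--     # Add N-terminal and C-terminal peptides
--     if cutsites:
--         n_terminal_peptide = protein_sequence[:cutsites[0]]
--         peptides.insert(0, n_terminal_peptide)
--         c_terminal_peptide = protein_sequence[cutsites[-1]:]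
--         peptides.append(c_terminal_peptide)
--
--     return [peptide for peptide in peptides if peptide]
-- ===== SOURCE B (Python) =====
-- def aspn_digest(protein_sequence):
--     peptides = []
--     current = ''
--     for aa in protein_sequence:
--         current += aa
--         if aa == 'D':
--             peptides.append(current)
--             current = ''
--     if current:
--         peptides.append(current)
--     return peptides
-- ===== Notes on version B (the rewrite author's own statement) =====
-- stated objective: simpler
-- what changed: Replaced the cutsite-index table, the index loop slicing between consecutive cutsites, the insert/append of terminal slices and the final empty-filter pass by a single accumulating pass that flushes a running buffer after each 'D' and emits the non-empty trailing buffer.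
import Mathlib
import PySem

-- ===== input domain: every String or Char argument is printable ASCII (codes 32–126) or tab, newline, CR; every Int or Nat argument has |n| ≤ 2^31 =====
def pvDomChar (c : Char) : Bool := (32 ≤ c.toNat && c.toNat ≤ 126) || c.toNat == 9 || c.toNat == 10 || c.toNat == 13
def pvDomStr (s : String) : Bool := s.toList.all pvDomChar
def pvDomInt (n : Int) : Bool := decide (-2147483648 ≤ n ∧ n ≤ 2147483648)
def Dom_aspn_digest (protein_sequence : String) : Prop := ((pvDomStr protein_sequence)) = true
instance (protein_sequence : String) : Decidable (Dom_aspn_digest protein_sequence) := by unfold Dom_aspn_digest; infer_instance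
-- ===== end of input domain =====

-- B replaces A's cutsite index table + slicing + empty-filter by one accumulating pass (simpler; return value proved equal).

-- ===== PORT A =====
def aspn_digest (protein_sequence : String) : List String :=
  let peptides : List String := []
  let cutsites : List Int :=
    [0] ++ (PySem.List.enumerate protein_sequence.toList 0).filterMap
      (fun ia => if ia.2 = 'D' then some (ia.1 + 1) else none)
  let peptides := (PySem.List.pyRange 0 ((cutsites.length : Int) - 1) 1).foldl
    (fun acc i => acc ++ [PySem.Str.slice protein_sequence
        (some (PySem.List.pyGetD cutsites i 0)) (some (PySem.List.pyGetD cutsites (i + 1) 0))])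
    peptides
  let peptides :=
    if cutsites.isEmpty then peptides else
      let n_terminal_peptide := PySem.Str.slice protein_sequence none (some (PySem.List.pyGetD cutsites 0 0))
      let peptides := PySem.List.insert peptides 0 n_terminal_peptide
      let c_terminal_peptide := PySem.Str.slice protein_sequence (some (PySem.List.pyGetD cutsites (-1) 0)) none
      peptides ++ [c_terminal_peptide]
  peptides.filter (fun p => p ≠ "")

-- ===== PORT B =====
def aspn_digest_alt (protein_sequence : String) : List String :=
  let fin := protein_sequence.toList.foldl
    (fun (st : List String × List Char) aa =>
      let current := st.2 ++ [aa]
      if aa = 'D' then (st.1 ++ [String.ofList current], []) else (st.1, current))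
    ([], [])
  if fin.2 = [] then fin.1 else fin.1 ++ [String.ofList fin.2]

-- ===== PRECONDITION & SPEC =====
def Spec_aspn_digest (protein_sequence : String) (out : List String) : Prop := out = aspn_digest_alt protein_sequence
instance (protein_sequence : String) (out : List String) : Decidable (Spec_aspn_digest protein_sequence out) := by unfold Spec_aspn_digest; infer_instance

-- ===== CLAIM (what is proved, stated in full; the proofs are below) =====
def Claim_equal_aspn_digest : Prop := ∀ (protein_sequence : String), Dom_aspn_digest protein_sequence → Spec_aspn_digest protein_sequence (aspn_digest protein_sequence)

-- ===== LEMMAS AND PROOFS =====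

/-- Common specification on `List Char`: the pieces, each ending just after a 'D'. -/
def splitD : List Char → List (List Char)
  | [] => []
  | c :: t =>
    if c = 'D' then [c] :: splitD t
    else
      match splitD t with
      | [] => [[c]]
      | q :: qs => (c :: q) :: qs

/-- The cut positions (index just after each 'D'), as naturals. -/
def dsN : List Char → List Nat
  | [] => []
  | c :: t => if c = 'D' then 1 :: (dsN t).map (· + 1) else (dsN t).map (· + 1)

/-- Slices of `l` between consecutive cut positions. -/
def adjN : Nat → List Nat → List Char → List (List Char)
  | _, [], _ => []
  | p, q :: qs, l => ((l.drop p).take (q - p)) :: adjN q qs l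

/-- The trailing piece after the last cut, if non-empty. -/
def tailPiece (l : List Char) : List (List Char) :=
  let r := l.drop ((dsN l).getLastD 0)
  if r = [] then [] else [r]

/-- Prepend a pending buffer onto the first piece. -/
def glue (cur : List Char) : List (List Char) → List (List Char)
  | [] => if cur = [] then [] else [cur]
  | q :: qs => (cur ++ q) :: qs

lemma glue_nil (ps : List (List Char)) : glue [] ps = ps := by
  cases ps <;> simp [glue]

lemma ds_chars (l : List Char) : ∀ (k : Int),
    (PySem.List.enumerate l k).filterMap (fun ia => if ia.2 = 'D' then some (ia.1 + 1) else none)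
      = (dsN l).map (fun n : Nat => (n : Int) + k) := by
  induction l with
  | nil => intro k; simp [PySem.List.enumerate_nil, dsN]
  | cons c t ih =>
    intro k
    rw [PySem.List.enumerate_cons, List.filterMap_cons]
    by_cases hc : c = 'D'
    · simp only [hc, dsN, if_pos, ih (k + 1)]
      simp only [ite_true, List.map_cons, List.map_map]
      refine List.cons_eq_cons.mpr ⟨by push_cast; ring, ?_⟩
      apply List.map_congr_left; intro x _; simp; ring
    · simp only [dsN, hc, ite_false, ih (k + 1), List.map_map]
      apply List.map_congr_left; intro x _; simp; ring

lemma pyGetD_neg_one {α : Type} (xs : List α) (d : α) :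
    PySem.List.pyGetD xs (-1) d = xs.getLastD d := by
  cases xs with
  | nil => simp [PySem.List.pyGetD, PySem.List.pyGet?, PySem.List.pyIdx?]
  | cons x t =>
    simp only [PySem.List.pyGetD, PySem.List.pyGet?, PySem.List.pyIdx?]
    have h1 : ¬ (0:Int) ≤ -1 := by norm_num
    have h2 : -(((x::t).length : Int)) ≤ -1 := by simp
    rw [if_neg h1, if_pos h2]
    rw [List.getLastD_eq_getLast?, List.getLast?_eq_getElem?]
    simp

lemma idx_loop_eq_adjN (qs : List Nat) : ∀ (p : Nat) (l : List Char),
    (PySem.List.pyRange 0 (((p :: qs).length : Int) - 1) 1).map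
      (fun i => PySem.List.slice l
        (some (PySem.List.pyGetD ((p :: qs).map (fun n : Nat => (n : Int))) i 0))
        (some (PySem.List.pyGetD ((p :: qs).map (fun n : Nat => (n : Int))) (i + 1) 0)))
      = adjN p qs l := by
  induction qs with
  | nil =>
    intro p l
    rw [PySem.List.pyRange_one_eq_nil (by simp)]
    simp [adjN]
  | cons q rest ih =>
    intro p l
    have hb : (0:Int) < ((p :: q :: rest).length : Int) - 1 := by simp
    rw [PySem.List.pyRange_one_cons (by simpa using hb), List.map_cons]
    show _ :: _ = ((l.drop p).take (q - p)) :: adjN q rest l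
    congr 1
    · have h0 : PySem.List.pyGetD (((p :: q :: rest)).map (fun n : Nat => (n : Int))) 0 0 = (p : Int) := by
        simpa using PySem.List.pyGetD_natCast (((p :: q :: rest)).map (fun n : Nat => (n : Int))) 0 0
      have h1 : PySem.List.pyGetD (((p :: q :: rest)).map (fun n : Nat => (n : Int))) (0 + 1) 0 = (q : Int) := by
        simpa using PySem.List.pyGetD_natCast (((p :: q :: rest)).map (fun n : Nat => (n : Int))) 1 0
      rw [h0, h1, PySem.List.slice_natCast]
    · rw [← ih q l]
      rw [PySem.List.pyRange_one, PySem.List.pyRange_one, List.map_map, List.map_map]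
      have hn : ((((p :: q :: rest).length : Int) - 1) - (0+1)).toNat = ((((q :: rest).length : Int) - 1) - 0).toNat := by
        simp
      rw [hn]
      apply List.map_congr_left
      intro k _
      simp only [Function.comp]
      have e1 : (0 : Int) + 1 + (k : Int) = ((k + 1 : Nat) : Int) := by push_cast; ring
      have e2 : ((k + 1 : Nat) : Int) + 1 = ((k + 2 : Nat) : Int) := by push_cast; ring
      have e3 : (0 : Int) + (k : Int) = ((k : Nat) : Int) := by push_cast; ring
      have e4 : ((k : Nat) : Int) + 1 = ((k + 1 : Nat) : Int) := by push_cast; ring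
      rw [e1, e2, e3, e4, PySem.List.pyGetD_natCast, PySem.List.pyGetD_natCast,
          PySem.List.pyGetD_natCast, PySem.List.pyGetD_natCast]
      simp [List.getD_cons_succ]

lemma adjN_shift (qs : List Nat) : ∀ (p : Nat) (c : Char) (l : List Char),
    adjN (p + 1) (qs.map (· + 1)) (c :: l) = adjN p qs l := by
  induction qs with
  | nil => intro p c l; simp [adjN]
  | cons q rest ih => intro p c l; simp [adjN, ih q c l]

lemma dsN_pos (l : List Char) : ∀ x ∈ dsN l, 1 ≤ x := by
  induction l with
  | nil => simp [dsN]
  | cons c t ih =>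
    intro x hx
    by_cases hc : c = 'D' <;> simp [dsN, hc] at hx
    · rcases hx with h | ⟨y, hy, rfl⟩ <;> omega
    · rcases hx with ⟨y, hy, rfl⟩; omega

lemma getLastD_map_succ (D : List Nat) (h : D ≠ []) :
    (D.map (· + 1)).getLastD 0 = D.getLastD 0 + 1 := by
  rw [List.getLastD_eq_getLast?, List.getLastD_eq_getLast?, List.getLast?_map]
  cases hD : D.getLast? with
  | none => exact absurd (List.getLast?_eq_none_iff.mp hD) h
  | some x => simp

lemma main_eq (l : List Char) :
    (adjN 0 (dsN l) l).filter (fun p => p ≠ []) ++ tailPiece l = splitD l := by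
  induction l with
  | nil => simp [dsN, adjN, tailPiece, splitD]
  | cons c t ih =>
    by_cases hc : c = 'D'
    · subst hc
      have hds : dsN ('D' :: t) = 1 :: (dsN t).map (· + 1) := by simp [dsN]
      have hadj : adjN 0 (dsN ('D' :: t)) ('D' :: t) = ['D'] :: adjN 0 (dsN t) t := by
        rw [hds]
        show (((('D' :: t).drop 0).take (1 - 0)) :: adjN 1 ((dsN t).map (· + 1)) ('D' :: t)) = _
        rw [show (1 : Nat) = 0 + 1 from rfl, adjN_shift (dsN t) 0 'D' t]
        simp
      have htail : tailPiece ('D' :: t) = tailPiece t := by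
        cases hD : dsN t with
        | nil => simp [tailPiece, hds, hD]
        | cons q qs =>
          have h1 : (dsN ('D' :: t)).getLastD 0 = (dsN t).getLastD 0 + 1 := by
            rw [hds, hD, List.getLastD_cons, List.getLastD_eq_getLast?,
              List.getLast?_map, List.getLastD_eq_getLast?]
            cases hq : (q :: qs).getLast? with
            | none => simp at hq
            | some x => simp [hq]
          simp only [tailPiece, h1, List.drop_succ_cons]
      rw [hadj, htail, List.filter_cons]
      simp [splitD]
      simpa using ih
    · cases hD : dsN t with
      | nil =>
        have hds : dsN (c :: t) = [] := by simp [dsN, hc, hD]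
        have hsp : splitD t = if t = [] then [] else [t] := by
          rw [← ih, hD]
          simp [adjN, tailPiece, hD]
        cases ht : t with
        | nil =>
          subst ht
          simp [hds, adjN, tailPiece, splitD, hc]
        | cons x xs =>
          subst ht
          have hspc : splitD (c :: x :: xs) = [c :: x :: xs] := by
            rw [splitD, hsp]
            simp [hc]
          simp [hds, adjN, tailPiece, hspc]
      | cons q qs =>
        have hq1 : 1 ≤ q := dsN_pos t q (by rw [hD]; exact List.mem_cons_self)
        have htne : t ≠ [] := by intro h; rw [h] at hD; simp [dsN] at hD
        have htake : t.take q ≠ [] := by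
          simp only [ne_eq, List.take_eq_nil_iff]
          rintro (h | h)
          · omega
          · exact htne h
        have hds : dsN (c :: t) = (dsN t).map (· + 1) := by simp [dsN, hc]
        have hadj : adjN 0 (dsN (c :: t)) (c :: t) = (c :: t.take q) :: adjN q qs t := by
          rw [hds, hD, List.map_cons]
          show ((c :: t).drop 0).take (q + 1 - 0) :: adjN (q + 1) (qs.map (· + 1)) (c :: t) = _
          rw [adjN_shift qs q c t]
          simp [List.take_succ_cons]
        have h1 : (dsN (c :: t)).getLastD 0 = (dsN t).getLastD 0 + 1 := by
          rw [hds, getLastD_map_succ _ (by rw [hD]; simp)]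
        have htail : tailPiece (c :: t) = tailPiece t := by
          simp only [tailPiece, h1, List.drop_succ_cons]
        have hadjt : adjN 0 (dsN t) t = (t.take q) :: adjN q qs t := by
          rw [hD]
          show (t.drop 0).take (q - 0) :: adjN q qs t = _
          simp
        have hsp : splitD t = (t.take q) ::
            (List.filter (fun p => decide (p ≠ [])) (adjN q qs t) ++ tailPiece t) := by
          rw [← ih, hadjt, List.filter_cons]
          simp [htake]
        rw [hadj, htail, List.filter_cons]
        simp only [splitD, hc, ite_false, hsp]
        simp

lemma filter_map_ofList (X : List (List Char)) :
    (X.map String.ofList).filter (fun p => p ≠ "") = (X.filter (fun p => p ≠ [])).map String.ofList := by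
  induction X with
  | nil => simp
  | cons x xs ih =>
    have ih' : (xs.map String.ofList).filter (fun p => !decide (p = ""))
        = (xs.filter (fun p => !decide (p = []))).map String.ofList := by simpa using ih
    by_cases hx : x = []
    · subst hx; simp [ih']
    · have hne : String.ofList x ≠ "" := by
        intro h; exact hx (String.ofList_inj.mp h)
      simp [hx, hne, ih']

lemma single_filter_ofList (r : List Char) :
    ([String.ofList r].filter (fun p => p ≠ ""))
      = (if r = [] then [] else [r]).map String.ofList := by
  by_cases hr : r = []
  · subst hr; simp
  · have hne : String.ofList r ≠ "" := fun h => hr (String.ofList_inj.mp h)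
    simp [hr, hne]

lemma portA_eq (ps : String) :
    aspn_digest ps = ((adjN 0 (dsN ps.toList) ps.toList).filter (fun p => p ≠ [])
      ++ tailPiece ps.toList).map String.ofList := by
  have hds0 : (PySem.List.enumerate ps.toList 0).filterMap
      (fun ia => if ia.2 = 'D' then some (ia.1 + 1) else none)
      = (dsN ps.toList).map (fun n : Nat => (n : Int)) := by
    rw [ds_chars ps.toList 0]
    apply List.map_congr_left; intro x _; simp
  have hcut : ([(0:Int)] ++ (dsN ps.toList).map (fun n : Nat => (n : Int)))
      = ((0 :: dsN ps.toList).map (fun n : Nat => (n : Int))) := by simp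
  unfold aspn_digest
  rw [hds0, hcut]
  set m := (dsN ps.toList).getLastD 0 with hm
  have hlast : ((0:Int) :: (dsN ps.toList).map (fun n : Nat => (n : Int))).getLastD 0
      = ((m : Nat) : Int) := by
    rw [List.getLastD_cons, List.getLastD_eq_getLast?, List.getLast?_map, hm,
      List.getLastD_eq_getLast?]
    cases h : (dsN ps.toList).getLast? <;> simp
  have hloop := idx_loop_eq_adjN (dsN ps.toList) 0 ps.toList
  simp only [List.map_cons, Nat.cast_zero, List.length_cons, List.length_map, Nat.cast_add,
    Nat.cast_one] at hloop ⊢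
  have h0 : PySem.List.pyGetD ((0:Int) :: (dsN ps.toList).map (fun n : Nat => (n : Int))) 0 0
      = (0:Int) := by
    simpa using PySem.List.pyGetD_natCast ((0:Int) :: (dsN ps.toList).map (fun n : Nat => (n : Int))) 0 0
  have hnt : PySem.List.slice ps.toList none (some (0:Int)) = [] := by
    simpa using PySem.List.slice_to_natCast ps.toList 0
  have hct : PySem.List.slice ps.toList (some ((m : Nat) : Int)) none = ps.toList.drop m :=
    PySem.List.slice_from_natCast ps.toList m
  simp only [List.isEmpty_cons, Bool.false_eq_true, if_false,
    PySem.List.foldl_append_singleton_eq_map, List.nil_append, h0,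
    pyGetD_neg_one, hlast, PySem.List.insert_zero, PySem.Str.slice,
    PySem.Chars.slice_eq_listSlice, hnt, hct]
  rw [show (fun i => String.ofList (PySem.List.slice ps.toList
      (some (PySem.List.pyGetD ((0:Int) :: (dsN ps.toList).map (fun n : Nat => (n : Int))) i 0))
      (some (PySem.List.pyGetD ((0:Int) :: (dsN ps.toList).map (fun n : Nat => (n : Int))) (i + 1) 0))))
    = String.ofList ∘ (fun i => PySem.List.slice ps.toList
      (some (PySem.List.pyGetD ((0:Int) :: (dsN ps.toList).map (fun n : Nat => (n : Int))) i 0))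
      (some (PySem.List.pyGetD ((0:Int) :: (dsN ps.toList).map (fun n : Nat => (n : Int))) (i + 1) 0)))
    from rfl, ← List.map_map, hloop]
  have hemp : String.ofList ([] : List Char) = "" := rfl
  rw [hemp]
  have htp : tailPiece ps.toList = if ps.toList.drop m = [] then [] else [ps.toList.drop m] := by
    rw [tailPiece, ← hm]
  rw [htp]
  rw [List.filter_append]
  have hfc : List.filter (fun p => decide (p ≠ ""))
        ("" :: List.map String.ofList (adjN 0 (dsN ps.toList) ps.toList))
      = List.filter (fun p => decide (p ≠ ""))
        (List.map String.ofList (adjN 0 (dsN ps.toList) ps.toList)) := by simp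
  rw [hfc, filter_map_ofList, single_filter_ofList, ← List.map_append]

def stepBfun (st : List String × List Char) (aa : Char) : List String × List Char :=
  if aa = 'D' then (st.1 ++ [String.ofList (st.2 ++ [aa])], []) else (st.1, st.2 ++ [aa])

def finishB (fin : List String × List Char) : List String :=
  if fin.2 = [] then fin.1 else fin.1 ++ [String.ofList fin.2]

lemma B_go (l : List Char) : ∀ (res : List String) (cur : List Char),
    finishB (l.foldl stepBfun (res, cur)) = res ++ (glue cur (splitD l)).map String.ofList := by
  induction l with
  | nil =>
    intro res cur
    cases hcur : cur <;> simp [splitD, glue, finishB]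
  | cons c t ih =>
    intro res cur
    rw [List.foldl_cons]
    by_cases hc : c = 'D'
    · subst hc
      have hstep : stepBfun (res, cur) 'D' = (res ++ [String.ofList (cur ++ ['D'])], []) := by
        simp [stepBfun]
      rw [hstep, ih (res ++ [String.ofList (cur ++ ['D'])]) [], glue_nil]
      have hsp : splitD ('D' :: t) = ['D'] :: splitD t := by simp [splitD]
      rw [hsp]
      simp [glue]
    · have hstep : stepBfun (res, cur) c = (res, cur ++ [c]) := by
        simp [stepBfun, hc]
      rw [hstep, ih res (cur ++ [c])]
      have hsp : splitD (c :: t) = match splitD t with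
        | [] => [[c]]
        | q :: qs => (c :: q) :: qs := by rw [splitD]; simp [hc]
      cases hs : splitD t with
      | nil => rw [hsp, hs]; simp [glue]
      | cons q qs => rw [hsp, hs]; simp [glue]

lemma portB_eq (ps : String) :
    aspn_digest_alt ps = (splitD ps.toList).map String.ofList := by
  have h : aspn_digest_alt ps = finishB (ps.toList.foldl stepBfun ([], [])) := rfl
  rw [h, B_go ps.toList [] [], glue_nil]
  simp

-- ===== VERDICT (by name: the statement is the Claim_ definition above) =====
theorem aspn_digest_spec : Claim_equal_aspn_digest := by
  intro ps _
  unfold Spec_aspn_digest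
  rw [portA_eq, portB_eq, main_eq]
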